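-- pv_equiv track=rewrite | github.com/SethHWeidman/codeforces | 028_buggy_robot/buggy_robot.py | buggy_robot
-- ===== SOURCE A (Python) =====
-- import collections
--
-- def buggy_robot(n: int, sequence: str) -> int:
--     cnts = collections.defaultdict(int)
--
--     max_moves_back_to_center = 0
--
--     for i in range(n):
--         move = sequence[i]
--         cnts[move] += 1
--
--         new_maximum = min(cnts['D'], cnts['U']) * 2 + min(cnts['L'], cnts['R']) * 2
--         max_moves_back_to_center = max(max_moves_back_to_center, new_maximum)
--
--     return max_moves_back_to_center
-- ===== SOURCE B (Python) =====
-- import collections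
--
-- def buggy_robot(n: int, sequence: str) -> int:
--     c = collections.Counter(sequence[:max(n, 0)])
--     return min(c['D'], c['U']) * 2 + min(c['L'], c['R']) * 2
-- ===== Notes on version B (the rewrite author's own statement) =====
-- stated objective: simpler
-- what changed: B builds one Counter of the first n characters and evaluates min(D,U)*2+min(L,R)*2 once, instead of A's loop that updates a defaultdict and re-evaluates the min expression and a running maximum on every iteration (valid because the counts, hence the expression, are monotone in the prefix).
import Mathlib
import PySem

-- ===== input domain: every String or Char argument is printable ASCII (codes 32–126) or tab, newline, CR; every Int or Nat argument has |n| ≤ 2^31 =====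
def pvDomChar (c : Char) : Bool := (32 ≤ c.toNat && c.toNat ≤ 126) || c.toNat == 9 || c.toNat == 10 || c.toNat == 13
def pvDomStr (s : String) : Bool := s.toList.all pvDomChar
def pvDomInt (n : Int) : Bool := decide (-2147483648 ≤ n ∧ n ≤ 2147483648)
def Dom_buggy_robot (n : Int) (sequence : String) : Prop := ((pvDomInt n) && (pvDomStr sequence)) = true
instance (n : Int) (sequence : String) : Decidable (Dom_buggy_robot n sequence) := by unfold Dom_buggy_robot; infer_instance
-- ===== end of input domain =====

-- B replaces A's loop (which threads a running maximum and re-evaluates the min expression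
-- every iteration) by one Counter of the first n characters and a single final min expression.

-- ===== PORT A =====
def buggy_robot (n : Int) (sequence : String) : Int :=
  let cs := sequence.toList
  ((PySem.List.pyRange 0 n 1).foldl (fun (s : PySem.Dict Char Int × Int) i =>
    let move := PySem.List.pyGetD cs i ' '          -- sequence[i]; in range under Pre_
    let cnts := s.1.modify move 0 (· + 1)           -- cnts[move] += 1 (defaultdict(int))
    let newMax := min (cnts.getD 'D' 0) (cnts.getD 'U' 0) * 2
                + min (cnts.getD 'L' 0) (cnts.getD 'R' 0) * 2
    (cnts, max s.2 newMax)) (PySem.Dict.empty, 0)).2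

-- ===== PORT B =====
def buggy_robot_alt (n : Int) (sequence : String) : Int :=
  -- sequence[:max(n, 0)] : the slice bound is nonnegative, so it is an exact prefix take
  let c := PySem.Dict.counter (sequence.toList.take (max n 0).toNat)
  min (c.getD 'D' 0) (c.getD 'U' 0) * 2 + min (c.getD 'L' 0) (c.getD 'R' 0) * 2

-- ===== PRECONDITION & SPEC =====
-- A raises IndexError when n exceeds the length of sequence; those inputs are excluded.
def Pre_buggy_robot (n : Int) (sequence : String) : Prop :=
  n ≤ (sequence.toList.length : Int)
instance (n : Int) (sequence : String) : Decidable (Pre_buggy_robot n sequence) := by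
  unfold Pre_buggy_robot; infer_instance

def pvWitness_buggy_robot : Int × String := (4, "DULR")

def Spec_buggy_robot (n : Int) (sequence : String) (out : Int) : Prop := out = buggy_robot_alt n sequence
instance (n : Int) (sequence : String) (out : Int) : Decidable (Spec_buggy_robot n sequence out) := by unfold Spec_buggy_robot; infer_instance

-- ===== CLAIM (what is proved, stated in full; the proofs are below) =====
def Claim_equal_buggy_robot : Prop := ∀ (n : Int) (sequence : String), Dom_buggy_robot n sequence → Pre_buggy_robot n sequence → Spec_buggy_robot n sequence (buggy_robot n sequence)

-- ===== LEMMAS AND PROOFS =====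

-- the final expression, as a function of the prefix processed so far
def pvScore (l : List Char) : Int :=
  min (l.count 'D' : Int) (l.count 'U' : Int) * 2
  + min (l.count 'L' : Int) (l.count 'R' : Int) * 2

-- A's loop body, abstracted over the character read (definitionally equal to the port's body)
def pvStep (s : PySem.Dict Char Int × Int) (move : Char) : PySem.Dict Char Int × Int :=
  let cnts := s.1.modify move 0 (· + 1)
  let newMax := min (cnts.getD 'D' 0) (cnts.getD 'U' 0) * 2
              + min (cnts.getD 'L' 0) (cnts.getD 'R' 0) * 2
  (cnts, max s.2 newMax)

lemma pvScore_mono_append_singleton (l : List Char) (x : Char) :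
    pvScore l ≤ pvScore (l ++ [x]) := by
  simp only [pvScore, List.count_append]
  push_cast
  omega

-- loop invariant: if the dict holds the counts of 'pre' and the running max equals
-- pvScore pre, then after folding the remaining characters l the max is pvScore (pre ++ l)
lemma pvLoop_snd (l : List Char) : ∀ (pre : List Char) (d : PySem.Dict Char Int) (m : Int),
    (∀ c, d.getD c 0 = (pre.count c : Int)) → m = pvScore pre →
    (l.foldl pvStep (d, m)).2 = pvScore (pre ++ l) := by
  induction l with
  | nil => intro pre d m hd hm; simpa using hm
  | cons x l ih =>
    intro pre d m hd hm
    simp only [List.foldl_cons]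
    have hd' : ∀ c, (d.modify x 0 (· + 1)).getD c 0 = ((pre ++ [x]).count c : Int) := by
      intro c
      rw [PySem.Dict.getD_modify]
      by_cases hcx : c = x
      · subst hcx; simp [hd, List.count_append]
      · have hxc : ¬ x = c := fun h => hcx h.symm
        simp [hcx, hxc, hd, List.count_append]
    have hstep : pvStep (d, m) x = (d.modify x 0 (· + 1), pvScore (pre ++ [x])) := by
      have hnew : min ((d.modify x 0 (· + 1)).getD 'D' 0) ((d.modify x 0 (· + 1)).getD 'U' 0) * 2
                + min ((d.modify x 0 (· + 1)).getD 'L' 0) ((d.modify x 0 (· + 1)).getD 'R' 0) * 2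
                = pvScore (pre ++ [x]) := by
        simp [pvScore, hd']
      have hmax : max m (pvScore (pre ++ [x])) = pvScore (pre ++ [x]) := by
        rw [hm]; exact max_eq_right (pvScore_mono_append_singleton pre x)
      simp [pvStep, hnew, hmax]
    rw [hstep]
    simpa using ih (pre ++ [x]) (d.modify x 0 (· + 1)) (pvScore (pre ++ [x])) hd' rfl

-- B's value is pvScore of the taken prefix
lemma pvAlt_eq (n : Int) (sequence : String) :
    buggy_robot_alt n sequence = pvScore (sequence.toList.take (max n 0).toNat) := by
  simp [buggy_robot_alt, pvScore, PySem.Dict.getD_counter]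

-- A's loop over range(n) reads exactly the prefix take n of cs (under n ≤ len cs)
lemma pvMain (cs : List Char) (n : Int) (h : n ≤ (cs.length : Int)) :
    ((PySem.List.pyRange 0 n 1).foldl
        (fun acc i => pvStep acc (PySem.List.pyGetD cs i ' ')) (PySem.Dict.empty, 0)).2
      = pvScore (cs.take (max n 0).toNat) := by
  by_cases hn : n ≤ 0
  · rw [PySem.List.pyRange_one_eq_nil hn]
    have h0 : (max n 0).toNat = 0 := by omega
    simp [h0, pvScore]
  · set xs := cs.take (max n 0).toNat with hxs
    have hlen : (xs.length : Int) = n := by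
      rw [hxs]; simp only [List.length_take]; omega
    have hfg : ∀ (acc : PySem.Dict Char Int × Int), ∀ i ∈ PySem.List.pyRange 0 n 1,
        pvStep acc (PySem.List.pyGetD cs i ' ') = pvStep acc (PySem.List.pyGetD xs i ' ') := by
      intro acc i hi
      rw [PySem.List.mem_pyRange_one] at hi
      have h2 : i < (xs.length : Int) := by rw [hlen]; exact hi.2
      have h3 : i < (cs.length : Int) := by omega
      rw [PySem.List.pyGetD_eq_getElem cs ' ' hi.1 h3,
          PySem.List.pyGetD_eq_getElem xs ' ' hi.1 h2]
      congr 1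
      simp [hxs, List.getElem_take]
    rw [PySem.List.foldl_congr_mem (PySem.List.pyRange 0 n 1) _
        (fun acc i => pvStep acc (PySem.List.pyGetD xs i ' ')) (PySem.Dict.empty, 0) hfg,
      ← hlen, PySem.List.foldl_pyRange_zero_pyGetD' xs ' ' pvStep (PySem.Dict.empty, 0)]
    exact pvLoop_snd xs [] PySem.Dict.empty 0 (by simp [PySem.Dict.getD_empty]) (by simp [pvScore])

-- ===== VERDICT (by name: the statement is the Claim_ definition above) =====
theorem buggy_robot_spec : Claim_equal_buggy_robot := by
  intro n sequence _ hpre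
  unfold Pre_buggy_robot at hpre
  unfold Spec_buggy_robot
  rw [pvAlt_eq]
  exact pvMain sequence.toList n hpre
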